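-- pv_equiv track=rewrite | github.com/pypi-data/pypi-mirror-404 | packages/valuesets/valuesets-0.4.2-py3-none-any.whl/valuesets/utils/mapping_utils.py | group_mappings_by_ontology
-- ===== SOURCE A (Python) =====
-- from typing import List, Dict, Tuple, Optional, Any, Union
--
-- def validate_curie_format(curie: str) -> bool:
--     """
--     Validate that a string is in CURIE format (prefix:local_id).
--
--     Args:
--         curie: String to validate
--
--     Returns:
--         True if valid CURIE format, False otherwise
--     """
--     if not curie or not isinstance(curie, str):
--         return False
--
--     parts = curie.split(':')
--     if len(parts) != 2:
--         return False
--
--     prefix, local_id = parts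
--     if not prefix or not local_id:
--         return False
--
--     # Basic validation - prefix should be alphanumeric (allowing underscores)
--     # local_id can contain more characters
--     return prefix.replace('_', '').isalnum()
--
-- def extract_ontology_prefix(curie: str) -> Optional[str]:
--     """
--     Extract the ontology prefix from a CURIE.
--
--     Args:
--         curie: CURIE string (e.g., "NCIT:C12345")
--
--     Returns:
--         The prefix part or None if invalid
--     """
--     if not validate_curie_format(curie):
--         return None
--
--     return curie.split(':')[0]
--
-- def group_mappings_by_ontology(
--     mappings: List[Tuple[str, str, Optional[str]]]
-- ) -> Dict[str, List[Tuple[str, str, Optional[str]]]]: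
--     """
--     Group mappings by their ontology prefix.
--
--     Args:
--         mappings: List of mapping tuples from extract_all_mappings
--
--     Returns:
--         Dictionary with ontology prefixes as keys and lists of mappings as values
--     """
--     grouped = {}
--
--     for object_id, predicate, comment in mappings:
--         prefix = extract_ontology_prefix(object_id)
--         if prefix:
--             if prefix not in grouped:
--                 grouped[prefix] = []
--             grouped[prefix].append((object_id, predicate, comment))
--         else:
--             # Handle non-CURIE mappings
--             if 'OTHER' not in grouped:
--                 grouped['OTHER'] = []
--             grouped['OTHER'].append((object_id, predicate, comment))
--
--     return grouped
-- ===== SOURCE B (Python) =====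
-- from typing import List, Dict, Tuple, Optional
--
--
-- def _group_key(object_id: str) -> str:
--     parts = object_id.split(':')
--     if len(parts) == 2 and parts[0] and parts[1] and parts[0].replace('_', '').isalnum():
--         return parts[0]
--     return 'OTHER'
--
--
-- def group_mappings_by_ontology(
--     mappings: List[Tuple[str, str, Optional[str]]]
-- ) -> Dict[str, List[Tuple[str, str, Optional[str]]]]:
--     keyed = [(_group_key(object_id), (object_id, predicate, comment))
--              for object_id, predicate, comment in mappings]
--     order = list(dict.fromkeys(k for k, _ in keyed))
--     return {k: [m for kk, m in keyed if kk == k] for k in order}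
-- ===== Notes on version B (the rewrite author's own statement) =====
-- stated objective: alternative
-- what changed: A inserts each mapping into a dict bucket as it walks the list; B tags every mapping with its group key in one pass, dedups the keys in first-occurrence order, and builds each group with a per-key filter over the tagged list.
import Mathlib
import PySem

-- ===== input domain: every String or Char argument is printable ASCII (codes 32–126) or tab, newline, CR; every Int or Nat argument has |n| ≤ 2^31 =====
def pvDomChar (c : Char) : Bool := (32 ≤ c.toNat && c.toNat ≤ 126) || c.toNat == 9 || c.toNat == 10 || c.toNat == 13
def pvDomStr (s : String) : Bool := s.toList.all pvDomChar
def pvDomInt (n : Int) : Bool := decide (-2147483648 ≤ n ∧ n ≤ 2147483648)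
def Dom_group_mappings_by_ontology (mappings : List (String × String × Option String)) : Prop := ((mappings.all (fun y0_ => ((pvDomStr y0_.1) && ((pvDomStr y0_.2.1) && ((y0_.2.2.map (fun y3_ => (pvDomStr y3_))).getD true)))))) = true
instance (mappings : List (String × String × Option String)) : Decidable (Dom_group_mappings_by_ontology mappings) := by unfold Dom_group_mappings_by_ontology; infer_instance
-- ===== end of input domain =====

-- B replaces A's insert-into-bucket dict loop by a key-tagging pass, an ordered key dedup
-- and a per-key filter pass (objective: alternative decomposition, same result).

-- ===== PORT A =====
def validate_curie_format (curie : String) : Bool :=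
  if curie == "" then false
  else
    let parts := (PySem.Str.split? curie ":").getD []   -- ':' is non-empty, so split? is always some
    if parts.length ≠ 2 then false
    else
      let pfx := parts.getD 0 ""
      let local_id := parts.getD 1 ""
      if pfx == "" || local_id == "" then false
      else PySem.Str.strIsalnum (PySem.Str.replace pfx "_" "")

def extract_ontology_prefix (curie : String) : Option String :=
  if !(validate_curie_format curie) then none
  else some (((PySem.Str.split? curie ":").getD []).getD 0 "")

def group_mappings_by_ontology (mappings : List (String × String × Option String)) : List (String × List (String × String × Option String)) :=
  (mappings.foldl (fun grouped m =>
      match extract_ontology_prefix m.1 with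
      | some p =>
          if p == "" then
            -- Python truthiness: an empty prefix would fall to the OTHER branch
            let g := if grouped.contains "OTHER" then grouped else grouped.insert "OTHER" []
            g.modify "OTHER" [] (fun v => v ++ [m])
          else
            let g := if grouped.contains p then grouped else grouped.insert p []
            g.modify p [] (fun v => v ++ [m])
      | none =>
          let g := if grouped.contains "OTHER" then grouped else grouped.insert "OTHER" []
          g.modify "OTHER" [] (fun v => v ++ [m]))
    (PySem.Dict.empty : PySem.Dict String (List (String × String × Option String)))).items

-- ===== PORT B =====
def pvGroupKey (object_id : String) : String :=
  let parts := (PySem.Str.split? object_id ":").getD []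
  if parts.length == 2 && !(parts.getD 0 "" == "") && !(parts.getD 1 "" == "")
      && PySem.Str.strIsalnum (PySem.Str.replace (parts.getD 0 "") "_" "") then
    parts.getD 0 ""
  else "OTHER"

def group_mappings_by_ontology_alt (mappings : List (String × String × Option String)) : List (String × List (String × String × Option String)) :=
  let keyed := mappings.map (fun m => (pvGroupKey m.1, m))
  let order := PySem.List.dedup (keyed.map (·.1))
  order.map (fun k => (k, (keyed.filter (fun p => p.1 == k)).map (·.2)))

-- ===== PRECONDITION & SPEC =====
def Spec_group_mappings_by_ontology (mappings : List (String × String × Option String)) (out : List (String × List (String × String × Option String))) : Prop := out = group_mappings_by_ontology_alt mappings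
instance (mappings : List (String × String × Option String)) (out : List (String × List (String × String × Option String))) : Decidable (Spec_group_mappings_by_ontology mappings out) := by unfold Spec_group_mappings_by_ontology; infer_instance

-- ===== CLAIM (what is proved, stated in full; the proofs are below) =====
def Claim_equal_group_mappings_by_ontology : Prop := ∀ (mappings : List (String × String × Option String)), Dom_group_mappings_by_ontology mappings → Spec_group_mappings_by_ontology mappings (group_mappings_by_ontology mappings)

-- ===== LEMMAS AND PROOFS =====

-- inserting an empty bucket before appending is one modify with default []
theorem pv_insert_modify {ν : Type} (d : PySem.Dict String ν) (k : String) (d0 : ν) (f : ν → ν) :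
    (if d.contains k then d else d.insert k d0).modify k d0 f = d.modify k d0 f := by
  by_cases h : d.contains k
  · simp [h]
  · simp only [PySem.Dict.contains, Bool.not_eq_true] at h
    rw [List.any_eq_false] at h
    have hf : List.find? (fun p => p.1 == k) d.items = none := by
      rw [List.find?_eq_none]; exact h
    simp [PySem.Dict.modify, PySem.Dict.insert, PySem.Dict.contains, List.any_eq_false.mpr h,
      PySem.Dict.getD, PySem.Dict.get?, hf]
    conv_rhs => rw [← List.map_id d.items]
    apply List.map_congr_left
    intro p hp
    simp [show ¬ p.1 = k by simpa using h p hp]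

-- when A validates a CURIE, B's key is exactly its (non-empty) prefix
theorem pv_key_of_validate (s : String) (h : validate_curie_format s = true) :
    pvGroupKey s = ((PySem.Str.split? s ":").getD []).getD 0 "" ∧
      ¬ (((PySem.Str.split? s ":").getD []).getD 0 "" = "") := by
  unfold validate_curie_format at h
  unfold pvGroupKey
  by_cases hlen : ((PySem.Str.split? s ":").getD []).length = 2
  · obtain ⟨a, b, hab⟩ := List.length_eq_two.mp hlen
    simp only [hab] at h ⊢
    simp_all
  · simp_all

-- when A rejects a CURIE, B's key is "OTHER"
theorem pv_key_of_not_validate (s : String) (h : validate_curie_format s = false) :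
    pvGroupKey s = "OTHER" := by
  unfold validate_curie_format at h
  unfold pvGroupKey
  by_cases hs : s = ""
  · subst hs; decide
  · by_cases hlen : ((PySem.Str.split? s ":").getD []).length = 2
    · obtain ⟨a, b, hab⟩ := List.length_eq_two.mp hlen
      simp only [hab] at h ⊢
      simp_all
    · simp_all

-- A's loop step is a single modify keyed by B's key function
theorem pv_step_eq (grouped : PySem.Dict String (List (String × String × Option String)))
    (m : String × String × Option String) :
    (match extract_ontology_prefix m.1 with
      | some p =>
          if p == "" then
            let g := if grouped.contains "OTHER" then grouped else grouped.insert "OTHER" []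
            g.modify "OTHER" [] (fun v => v ++ [m])
          else
            let g := if grouped.contains p then grouped else grouped.insert p []
            g.modify p [] (fun v => v ++ [m])
      | none =>
          let g := if grouped.contains "OTHER" then grouped else grouped.insert "OTHER" []
          g.modify "OTHER" [] (fun v => v ++ [m]))
    = grouped.modify (pvGroupKey m.1) [] (fun v => v ++ [m]) := by
  unfold extract_ontology_prefix
  cases hv : validate_curie_format m.1 with
  | false =>
      simp only [Bool.not_false, if_true]
      rw [pv_insert_modify, pv_key_of_not_validate m.1 hv]
  | true =>
      obtain ⟨hk, hne⟩ := pv_key_of_validate m.1 hv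
      simp only [Bool.not_true, Bool.false_eq_true, if_false,
        show ((((PySem.Str.split? m.1 ":").getD []).getD 0 "") == "") = false by simpa using hne]
      rw [pv_insert_modify, hk]

-- ===== VERDICT (by name: the statement is the Claim_ definition above) =====
set_option maxHeartbeats 1000000 in
theorem group_mappings_by_ontology_spec : Claim_equal_group_mappings_by_ontology := by
  intro mappings _
  unfold Spec_group_mappings_by_ontology group_mappings_by_ontology group_mappings_by_ontology_alt
  have h1 := PySem.List.foldl_congr_mem mappings _
      (fun (d : PySem.Dict String (List (String × String × Option String))) m =>
        d.modify (pvGroupKey m.1) [] (fun v => v ++ [m]))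
      (PySem.Dict.empty) (fun acc x _ => pv_step_eq acc x)
  rw [h1]
  -- glue specific to the two ports: tagging each mapping with its key commutes with the fold
  have h2 : ∀ (l : List (String × String × Option String))
      (d : PySem.Dict String (List (String × String × Option String))),
      l.foldl (fun d m => d.modify (pvGroupKey m.1) [] (fun v => v ++ [m])) d
      = (l.map (fun m => (pvGroupKey m.1, m))).foldl
          (fun d p => d.modify p.1 [] (fun v => v ++ [p.2])) d := by
    intro l
    induction l with
    | nil => intro d; rfl
    | cons x t ih => intro d; simp only [List.foldl_cons, List.map_cons]; exact ih _
  rw [h2 mappings PySem.Dict.empty]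
  have hnd := PySem.Dict.nodup_keys_foldl_modify_key
      (mappings.map (fun m => (pvGroupKey m.1, m))) Prod.fst []
      (fun _ p v => v ++ [p.2]) PySem.Dict.empty (by simp [pysem])
  rw [PySem.Dict.items_eq_map_keys _ hnd []]
  rw [PySem.Dict.keys_foldl_modify_key
      (mappings.map (fun m => (pvGroupKey m.1, m))) Prod.fst []
      (fun _ p v => v ++ [p.2]) PySem.Dict.empty]
  simp only [PySem.List.dedup_eq_ofList, PySem.Set.ofList_eq_foldl, PySem.Set.update,
    PySem.Dict.keys_empty]
  apply List.map_congr_left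
  intro k _
  rw [PySem.Dict.getD_foldl_modify_append]
  simp [pysem]
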